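-- pv_equiv track=rewrite | github.com/jms7446/hackerrank | baekjoon/platinum/p1498.py | solve
-- ===== SOURCE A (Python) =====
-- def solve(ptn):
--     table = [0] * len(ptn)
--     j = 0
--     res = []
--     base = 0
--     for i in range(1, len(ptn)):
--         while ptn[j] != ptn[i] and j > 0:
--             j = table[j - 1]
--             base = 0
--         if ptn[j] == ptn[i]:
--             j += 1
--             table[i] = j
--             if i + 1 == j * 2:
--                 base = j
--             if base > 0 and (i + 1) % base == 0:
--                 res.append((i + 1, (i + 1) // base))
--     return res
-- ===== SOURCE B (Python) =====
-- def solve(ptn):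
--     n = len(ptn)
--     table = [0] * n
--     j = 0
--     for i in range(1, n):
--         while j > 0 and ptn[j] != ptn[i]:
--             j = table[j - 1]
--         if ptn[j] == ptn[i]:
--             j += 1
--             table[i] = j
--     res = []
--     for L in range(1, n + 1):
--         p = L - table[L - 1]
--         if p < L and L % p == 0:
--             res.append((L, L // p))
--     return res
-- ===== Notes on version B (the rewrite author's own statement) =====
-- stated objective: alternative
-- what changed: A's fused single pass, which tracks a running base period with inline resets, is replaced by a clean two-phase decomposition: first the plain KMP failure table is built, then a separate scan derives each periodic prefix from the closed-form smallest period p = L - table[L-1] (emit (L, L//p) when p < L and p divides L).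
import Mathlib
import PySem

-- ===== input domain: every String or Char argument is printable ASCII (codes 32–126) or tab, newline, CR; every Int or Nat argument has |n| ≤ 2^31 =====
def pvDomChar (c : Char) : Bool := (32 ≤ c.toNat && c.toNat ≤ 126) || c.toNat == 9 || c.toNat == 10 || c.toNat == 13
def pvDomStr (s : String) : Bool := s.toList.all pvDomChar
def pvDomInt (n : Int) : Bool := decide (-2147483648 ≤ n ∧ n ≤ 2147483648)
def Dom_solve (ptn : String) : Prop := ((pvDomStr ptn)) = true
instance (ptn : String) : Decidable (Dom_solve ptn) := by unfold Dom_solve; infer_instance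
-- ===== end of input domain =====

-- B replaces A's fused pass with its inline running-period bookkeeping by two phases: build the
-- KMP failure table, then scan prefix lengths with the closed-form smallest period
-- p = L - table[L-1].  Same O(n) cost; objective: alternative decomposition.
-- Return-value equivalence only; neither program mutates its argument.

-- ===== PORT A =====
-- ptn[k]: every access in both programs provably has k < length, so getD is exact here.
def pvChar (s : List Char) (k : Nat) : Char := s.getD k ' '

-- A's 'while ptn[j] != ptn[i] and j > 0: j = table[j-1]; base = 0'.
-- fuel := the entry value of j is enough: table[k] ≤ k (proved below), so j strictly
-- decreases and the loop halts at j = 0, exactly like the Python while.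
def solveWhileA (s : List Char) (ci : Char) (table : List Nat) : Nat → Nat → Nat → Nat × Nat
  | 0, j, base => (j, base)
  | fuel+1, j, base =>
    if pvChar s j ≠ ci ∧ 0 < j then solveWhileA s ci table fuel (table.getD (j-1) 0) 0
    else (j, base)

-- one iteration of A's 'for i in range(1, len(ptn))' body; state (table, j, base, res).
-- '//' and '%' act on nonnegative ints here, so Nat division/mod are exact.
def solveStepA (s : List Char) (st : List Nat × Nat × Nat × List (Int × Int)) (i : Nat) :
    List Nat × Nat × Nat × List (Int × Int) :=
  let (table, j0, base0, res) := st
  let jb := solveWhileA s (pvChar s i) table j0 j0 base0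
  let j := jb.1
  let base := jb.2
  if pvChar s j = pvChar s i then
    let j' := j + 1
    let table' := table.set i j'
    let base' := if i + 1 = j' * 2 then j' else base
    let res' := if 0 < base' ∧ (i + 1) % base' = 0 then
        res ++ [(((i+1 : Nat) : Int), (((i+1) / base' : Nat) : Int))] else res
    (table', j', base', res')
  else (table, j, base, res)

def solve (ptn : String) : List (Int × Int) :=
  let s := ptn.toList
  (((List.range' 1 (s.length - 1)).foldl (solveStepA s)
      (List.replicate s.length 0, 0, 0, ([] : List (Int × Int))))).2.2.2

-- ===== PORT B =====
-- B's phase-1 'while j > 0 and ptn[j] != ptn[i]: j = table[j-1]' (same fuel argument).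
def solveWhileB (s : List Char) (ci : Char) (table : List Nat) : Nat → Nat → Nat
  | 0, j => j
  | fuel+1, j =>
    if 0 < j ∧ pvChar s j ≠ ci then solveWhileB s ci table fuel (table.getD (j-1) 0)
    else j

def solveStepB (s : List Char) (st : List Nat × Nat) (i : Nat) : List Nat × Nat :=
  let (table, j0) := st
  let j := solveWhileB s (pvChar s i) table j0 j0
  if pvChar s j = pvChar s i then (table.set i (j+1), j+1) else (table, j)

def solve_alt (ptn : String) : List (Int × Int) :=
  let s := ptn.toList
  let n := s.length
  let table := ((List.range' 1 (n - 1)).foldl (solveStepB s) (List.replicate n 0, 0)).1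
  (List.range' 1 n).foldl (fun res L =>
    let p := L - table.getD (L-1) 0
    if p < L ∧ L % p = 0 then res ++ [(((L : Nat) : Int), (((L / p : Nat)) : Int))] else res) []

-- ===== PRECONDITION & SPEC =====
def Spec_solve (ptn : String) (out : List (Int × Int)) : Prop := out = solve_alt ptn
instance (ptn : String) (out : List (Int × Int)) : Decidable (Spec_solve ptn out) := by unfold Spec_solve; infer_instance

-- ===== CLAIM (what is proved, stated in full; the proofs are below) =====
def Claim_equal_solve : Prop := ∀ (ptn : String), Dom_solve ptn → Spec_solve ptn (solve ptn)

-- ===== LEMMAS AND PROOFS =====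

-- ======== periodicity toolkit (proof side) ========

-- u has period p: characters p apart agree
def Per (u : List Char) (p : Nat) : Prop :=
  ∀ t, t + p < u.length → u.getD t ' ' = u.getD (t + p) ' '

theorem per_of_len_le (u : List Char) (p : Nat) (h : u.length ≤ p) : Per u p := by
  intro t ht; omega

theorem minp_ex (s : List Char) (i : Nat) : ∃ p, 1 ≤ p ∧ Per (s.take i) p :=
  ⟨(s.take i).length + 1, by omega, per_of_len_le _ _ (by omega)⟩

-- smallest proper period of the prefix of length i (used only in proofs)
noncomputable def minp (s : List Char) (i : Nat) : Nat :=
  @Nat.find (fun p => 1 ≤ p ∧ Per (s.take i) p) (Classical.decPred _) (minp_ex s i)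

theorem minp_pos (s : List Char) (i : Nat) : 1 ≤ minp s i :=
  (@Nat.find_spec (fun p => 1 ≤ p ∧ Per (s.take i) p) (Classical.decPred _) (minp_ex s i)).1

theorem minp_per (s : List Char) (i : Nat) : Per (s.take i) (minp s i) :=
  (@Nat.find_spec (fun p => 1 ≤ p ∧ Per (s.take i) p) (Classical.decPred _) (minp_ex s i)).2

theorem minp_min (s : List Char) (i p : Nat) (h1 : 1 ≤ p) (hp : Per (s.take i) p) :
    minp s i ≤ p :=
  @Nat.find_min' (fun p => 1 ≤ p ∧ Per (s.take i) p) (Classical.decPred _) (minp_ex s i) p ⟨h1, hp⟩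

theorem minp_le (s : List Char) (i : Nat) (h : 1 ≤ i) : minp s i ≤ i :=
  minp_min s i i h (per_of_len_le _ _ (by simp))

theorem minp_one (s : List Char) : minp s 1 = 1 :=
  Nat.le_antisymm (minp_le s 1 le_rfl) (minp_pos s 1)

theorem getD_take_eq (u : List Char) (k t : Nat) (h : t < k) :
    (u.take k).getD t ' ' = u.getD t ' ' := by
  rw [List.getD_eq_getElem?_getD, List.getD_eq_getElem?_getD, List.getElem?_take_of_lt h]

theorem per_take (u : List Char) (p k : Nat) (h : Per u p) : Per (u.take k) p := by
  intro t ht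
  have hl : (u.take k).length = min k u.length := List.length_take ..
  rw [hl] at ht
  rw [getD_take_eq u k t (by omega), getD_take_eq u k (t + p) (by omega)]
  exact h t (by omega)

-- border of a border is a border (period composition)
theorem per_compose (u : List Char) (p r : Nat) (hp : Per u p)
    (hr : Per (u.take (u.length - p)) r) (hpl : p ≤ u.length) : Per u (p + r) := by
  intro t ht
  have hl : (u.take (u.length - p)).length = u.length - p := by simp
  have h1 : u.getD t ' ' = u.getD (t + r) ' ' := by
    have := hr t (by omega)
    rwa [getD_take_eq u _ t (by omega), getD_take_eq u _ (t + r) (by omega)] at this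
  have h2 : u.getD (t + r) ' ' = u.getD (t + r + p) ' ' := hp (t + r) (by omega)
  rw [h1, h2]; congr 1; omega

-- a shorter border seen inside a longer border (period restriction)
theorem per_restrict (u : List Char) (p q : Nat) (hp : Per u p) (hq : Per u q)
    (hqp : q < p) (hpl : p ≤ u.length) : Per (u.take (u.length - q)) (p - q) := by
  intro t ht
  have hl : (u.take (u.length - q)).length = u.length - q := by simp
  rw [hl] at ht
  rw [getD_take_eq u _ t (by omega), getD_take_eq u _ (t + (p - q)) (by omega)]
  have h1 : u.getD t ' ' = u.getD (t + p) ' ' := hp t (by omega)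
  have h2 : u.getD (t + (p - q)) ' ' = u.getD (t + (p - q) + q) ' ' := hq _ (by omega)
  have h3 : t + (p - q) + q = t + p := by omega
  rw [h3] at h2; rw [h1, h2]

theorem per_sub (u : List Char) (p q : Nat) (hp : Per u p) (hq : Per u q)
    (hqp : q < p) (hsum : p + q ≤ u.length) : Per u (p - q) := by
  intro t ht
  by_cases hc : t + p < u.length
  · have h1 := hp t hc
    have h2 := hq (t + p - q) (by omega)
    have e1 : t + p - q + q = t + p := by omega
    have e2 : t + (p - q) = t + p - q := by omega
    rw [e1] at h2; rw [e2, h2, h1]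
  · have h1 := hq (t - q) (by omega)
    have h2 := hp (t - q) (by omega)
    have e1 : t - q + q = t := by omega
    have e2 : t - q + p = t + (p - q) := by omega
    rw [e1] at h1; rw [e2] at h2; rw [← h1, h2]

theorem per_mul (u : List Char) (g : Nat) (hg : Per u g) :
    ∀ k a, a + g * k < u.length → u.getD a ' ' = u.getD (a + g * k) ' ' := by
  intro k
  induction k with
  | zero => intro a _; simp
  | succ k ih =>
    intro a ha
    have h1 : u.getD a ' ' = u.getD (a + g * k) ' ' := ih a (by nlinarith [Nat.le_refl g])
    have h2 : u.getD (a + g * k) ' ' = u.getD (a + g * k + g) ' ' := hg _ (by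
      have : a + g * (k + 1) = a + g * k + g := by ring
      omega)
    have e : a + g * k + g = a + g * (k + 1) := by ring
    rw [h1, h2, e]

theorem fine_wilf (u : List Char) :
    ∀ n p q, p + q ≤ n → 1 ≤ p → 1 ≤ q → Per u p → Per u q → p + q ≤ u.length →
      Per u (Nat.gcd p q) := by
  intro n
  induction n with
  | zero => intro p q h hp1; omega
  | succ n ih =>
    intro p q hn hp1 hq1 hp hq hlen
    rcases lt_trichotomy p q with h | h | h
    · have hper : Per u (q - p) := per_sub u q p hq hp h (by omega)
      have hg : Nat.gcd p (q - p) = Nat.gcd p q := by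
        rw [Nat.gcd_comm p (q - p), Nat.gcd_sub_self_left (by omega), Nat.gcd_comm]
      by_cases hqp : q - p = 0
      · omega
      · have := ih p (q - p) (by omega) hp1 (by omega) hp hper (by omega)
        rwa [hg] at this
    · subst h; rwa [Nat.gcd_self]
    · have hper : Per u (p - q) := per_sub u p q hp hq h (by omega)
      have hg : Nat.gcd (p - q) q = Nat.gcd p q := Nat.gcd_sub_self_left (by omega)
      by_cases hpq : p - q = 0
      · omega
      · have := ih (p - q) q (by omega) (by omega) hq1 hper hq (by omega)
        rwa [hg] at this

-- ======== prefix-specific facts ========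

theorem take_len (s : List Char) (i : Nat) (h : i ≤ s.length) : (s.take i).length = i := by
  simp [h]

-- the longest proper border of the prefix of length i has length i - minp s i
theorem border_le_max (s : List Char) (i b : Nat) (hb : b < i) (_hi : i ≤ s.length)
    (hper : Per (s.take i) (i - b)) : b ≤ i - minp s i := by
  have := minp_min s i (i - b) (by omega) hper
  have := minp_le s i (by omega)
  omega

-- extending a matching border: the prefix of length i+1 keeps period i - r
theorem per_succ_of_match (s : List Char) (i r : Nat) (hi : i < s.length) (hri : r < i)
    (hper : Per (s.take i) (i - r)) (hm : pvChar s r = pvChar s i) :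
    Per (s.take (i + 1)) (i - r) := by
  intro t ht
  have hl : (s.take (i + 1)).length = i + 1 := take_len s (i + 1) (by omega)
  rw [hl] at ht
  rw [getD_take_eq s _ t (by omega), getD_take_eq s _ (t + (i - r)) (by omega)]
  by_cases hc : t + (i - r) < i
  · have := hper t (by rw [take_len s i (by omega)]; omega)
    rwa [getD_take_eq s i t (by omega), getD_take_eq s i (t + (i - r)) (by omega)] at this
  · rw [show t + (i - r) = i from by omega, show t = r from by omega]
    exact hm

theorem minp_succ_match (s : List Char) (i r : Nat) (hi : i < s.length) (hri : r < i)
    (hper : Per (s.take i) (i - r)) (hm : pvChar s r = pvChar s i)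
    (hmax : ∀ b, r < b → b ≤ i - minp s i → Per (s.take i) (i - b) →
      pvChar s b ≠ pvChar s i) :
    minp s (i + 1) = i - r := by
  have hub : minp s (i + 1) ≤ i - r :=
    minp_min s (i + 1) (i - r) (by omega) (per_succ_of_match s i r hi hri hper hm)
  by_contra hne
  set q := minp s (i + 1) with hqdef
  have hq1 : 1 ≤ q := minp_pos s (i + 1)
  have hqlt : q < i - r := by omega
  have hqper : Per (s.take (i + 1)) q := minp_per s (i + 1)
  have hqi : Per (s.take i) q := by
    have := per_take (s.take (i + 1)) q i hqper
    rwa [List.take_take, Nat.min_eq_left (by omega)] at this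
  have hbper : Per (s.take i) (i - (i - q)) := by
    have e : i - (i - q) = q := by omega
    rwa [e]
  have hble : i - q ≤ i - minp s i := border_le_max s i (i - q) (by omega) (by omega) hbper
  have hch : pvChar s (i - q) = pvChar s i := by
    have := hqper (i - q) (by rw [take_len s (i + 1) (by omega)]; omega)
    have e : i - q + q = i := by omega
    rw [e] at this
    rwa [getD_take_eq s (i + 1) (i - q) (by omega), getD_take_eq s (i + 1) i (by omega)] at this
  exact hmax (i - q) (by omega) hble hbper hch

theorem minp_succ_nomatch (s : List Char) (i : Nat) (hi : i < s.length)
    (h0 : pvChar s 0 ≠ pvChar s i)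
    (hmax : ∀ b, 0 < b → b ≤ i - minp s i → Per (s.take i) (i - b) →
      pvChar s b ≠ pvChar s i) :
    minp s (i + 1) = i + 1 := by
  have hub : minp s (i + 1) ≤ i + 1 := minp_le s (i + 1) (by omega)
  by_contra hne
  set q := minp s (i + 1) with hqdef
  have hq1 : 1 ≤ q := minp_pos s (i + 1)
  have hqlt : q ≤ i := by omega
  have hqper : Per (s.take (i + 1)) q := minp_per s (i + 1)
  have hqi : Per (s.take i) q := by
    have := per_take (s.take (i + 1)) q i hqper
    rwa [List.take_take, Nat.min_eq_left (by omega)] at this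
  have hbper : Per (s.take i) (i - (i - q)) := by
    have e : i - (i - q) = q := by omega
    rwa [e]
  have hch : pvChar s (i - q) = pvChar s i := by
    have := hqper (i - q) (by rw [take_len s (i + 1) (by omega)]; omega)
    have e : i - q + q = i := by omega
    rw [e] at this
    rwa [getD_take_eq s (i + 1) (i - q) (by omega), getD_take_eq s (i + 1) i (by omega)] at this
  by_cases hb0 : i - q = 0
  · rw [hb0] at hch; exact h0 hch
  · have hble : i - q ≤ i - minp s i := border_le_max s i (i - q) (by omega) (by omega) hbper
    exact hmax (i - q) (by omega) hble hbper hch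

-- the Fine–Wilf step: if the failure loop had to fall back at position i, the new prefix
-- i+1 cannot be strongly periodic (its smallest period is at least (i+1)/2)
theorem fallback_ge (s : List Char) (i : Nat) (hi : i < s.length) (h1 : 1 ≤ i)
    (hmis : pvChar s (i - minp s i) ≠ pvChar s i) :
    i + 1 ≤ 2 * minp s (i + 1) := by
  by_contra hlt
  set p := minp s (i + 1) with hpdef
  set q := minp s i with hqdef
  have hp1 : 1 ≤ p := minp_pos s (i + 1)
  have hq1 : 1 ≤ q := minp_pos s i
  have hqi : q ≤ i := minp_le s i h1
  have h2p : 2 * p < i + 1 := by omega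
  have hpper : Per (s.take (i + 1)) p := minp_per s (i + 1)
  have hpi : Per (s.take i) p := by
    have := per_take (s.take (i + 1)) p i hpper
    rwa [List.take_take, Nat.min_eq_left (by omega)] at this
  have hqp : q ≤ p := minp_min s i p hp1 hpi
  have hstep : pvChar s (i - p) = pvChar s i := by
    have := hpper (i - p) (by rw [take_len s (i + 1) (by omega)]; omega)
    have e : i - p + p = i := by omega
    rw [e] at this
    rwa [getD_take_eq s (i + 1) (i - p) (by omega), getD_take_eq s (i + 1) i (by omega)] at this
  by_cases hqp' : q = p
  · rw [hqp'] at hmis; exact hmis hstep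
  · have hqlt : q < p := by omega
    have hqper : Per (s.take i) q := minp_per s i
    have hg : Per (s.take i) (Nat.gcd p q) :=
      fine_wilf (s.take i) (p + q) p q le_rfl hp1 hq1 hpi hqper
        (by rw [take_len s i (by omega)]; omega)
    set g := Nat.gcd p q with hgdef
    have hg1 : 1 ≤ g := Nat.gcd_pos_of_pos_left q hp1
    have hgq : g ≤ q := Nat.le_of_dvd (by omega) (Nat.gcd_dvd_right p q)
    have hgp : g ∣ p := Nat.gcd_dvd_left p q
    have hglt : g < p := by omega
    -- s[i-g] = s[i-p] by climbing the g-periodic prefix, then = s[i]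
    obtain ⟨c, hc⟩ := hgp
    obtain ⟨c', rfl⟩ : ∃ c', c = c' + 1 := by
      refine ⟨c - 1, ?_⟩
      rcases Nat.eq_zero_or_pos c with h | h
      · subst h; omega
      · omega
    have hgc : g * c' = p - g := by
      have : g * (c' + 1) = g * c' + g := by ring
      omega
    have hclimb : (s.take i).getD (i - p) ' ' = (s.take i).getD (i - p + g * c') ' ' :=
      per_mul (s.take i) g hg c' (i - p)
        (by rw [take_len s i (by omega)]; omega)
    have he : i - p + g * c' = i - g := by omega
    rw [he] at hclimb
    rw [getD_take_eq s i (i - p) (by omega), getD_take_eq s i (i - g) (by omega)] at hclimb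
    -- so the prefix of length i+1 has period g
    have hgsucc : Per (s.take (i + 1)) g := by
      intro t ht
      rw [take_len s (i + 1) (by omega)] at ht
      rw [getD_take_eq s (i + 1) t (by omega), getD_take_eq s (i + 1) (t + g) (by omega)]
      by_cases hcase : t + g < i
      · have := hg t (by rw [take_len s i (by omega)]; omega)
        rwa [getD_take_eq s i t (by omega), getD_take_eq s i (t + g) (by omega)] at this
      · have ht' : t = i - g := by omega
        subst ht'
        rw [show i - g + g = i from by omega, ← hclimb]
        exact hstep
    have := minp_min s (i + 1) g hg1 hgsucc
    omega

-- ======== the table specification ========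

-- entries 0..m-1 hold their final failure values, the rest are still 0
noncomputable def TS (s : List Char) (m : Nat) : List Nat :=
  (List.range s.length).map (fun k => if k + 1 ≤ m then (k + 1) - minp s (k + 1) else 0)

theorem TS_getD (s : List Char) (m k : Nat) (hk : k < s.length) :
    (TS s m).getD k 0 = if k + 1 ≤ m then (k + 1) - minp s (k + 1) else 0 := by
  rw [TS, List.getD_eq_getElem?_getD, List.getElem?_map, List.getElem?_range hk]
  rfl

theorem TS_one (s : List Char) : TS s 1 = List.replicate s.length 0 := by
  apply List.ext_getElem
  · simp [TS]
  · intro k h1 h2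
    simp only [TS, List.getElem_map, List.getElem_range, List.getElem_replicate]
    by_cases h : k + 1 ≤ 1
    · have : k = 0 := by omega
      subst this; simp [minp_one]
    · simp [h]

theorem TS_set (s : List Char) (m : Nat) (hm : m < s.length) :
    (TS s m).set m ((m + 1) - minp s (m + 1)) = TS s (m + 1) := by
  apply List.ext_getElem
  · simp [TS]
  · intro k h1 h2
    simp only [TS, List.length_map, List.length_range] at h1 h2 ⊢
    by_cases hk : k = m
    · subst hk
      rw [List.getElem_set_self (by simpa [TS] using hm)]
      simp
    · rw [List.getElem_set_ne (by omega)]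
      simp only [List.getElem_map, List.getElem_range]
      by_cases hle : k + 1 ≤ m
      · rw [if_pos hle, if_pos (by omega)]
      · rw [if_neg hle, if_neg (by omega)]

theorem TS_nomatch (s : List Char) (m : Nat) (hm : m < s.length)
    (h : minp s (m + 1) = m + 1) : TS s m = TS s (m + 1) := by
  apply List.ext_getElem
  · simp [TS]
  · intro k h1 h2
    simp only [TS, List.getElem_map, List.getElem_range]
    by_cases hk : k = m
    · subst hk; simp [h]
    · simp only [TS, List.length_map, List.length_range] at h1
      by_cases hle : k + 1 ≤ m
      · rw [if_pos hle, if_pos (by omega)]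
      · rw [if_neg hle, if_neg (by omega)]

-- ======== the emitted list specification ========

noncomputable def emitF (s : List Char) (L : Nat) : Option (Int × Int) :=
  if minp s L < L ∧ L % minp s L = 0 then
    some (((L : Nat) : Int), (((L / minp s L : Nat)) : Int)) else none

noncomputable def resSpec (s : List Char) (m : Nat) : List (Int × Int) :=
  (List.range' 1 m).filterMap (emitF s)

theorem resSpec_one (s : List Char) : resSpec s 1 = [] := by
  simp [resSpec, List.range', emitF, minp_one]

theorem resSpec_succ (s : List Char) (m : Nat) :
    resSpec s (m + 1) = resSpec s m ++ (emitF s (m + 1)).toList := by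
  rw [resSpec, resSpec, List.range'_concat, List.filterMap_append]
  congr 1
  rw [show 1 + 1 * m = m + 1 from by omega]
  rcases h : emitF s (m + 1) with _ | v <;> simp [h]

-- ======== while-loop lemmas ========

theorem whileA_fst (s : List Char) (c : Char) (T : List Nat) :
    ∀ fuel j base, (solveWhileA s c T fuel j base).1 = solveWhileB s c T fuel j := by
  intro fuel
  induction fuel with
  | zero => intro j base; rfl
  | succ fuel ih =>
    intro j base
    by_cases h1 : 0 < j <;> by_cases h2 : pvChar s j ≠ c <;>
      simp [solveWhileA, solveWhileB, h1, h2, ih]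

theorem whileA_snd_zero (s : List Char) (c : Char) (T : List Nat) :
    ∀ fuel j, (solveWhileA s c T fuel j 0).2 = 0 := by
  intro fuel
  induction fuel with
  | zero => intro j; rfl
  | succ fuel ih =>
    intro j
    by_cases h1 : 0 < j <;> by_cases h2 : pvChar s j ≠ c <;>
      simp [solveWhileA, h1, h2, ih]

theorem whileA_snd (s : List Char) (c : Char) (T : List Nat) (fuel j base : Nat)
    (hfj : j ≤ fuel) :
    (solveWhileA s c T fuel j base).2 =
      if 0 < j ∧ pvChar s j ≠ c then 0 else base := by
  cases fuel with
  | zero =>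
    have : j = 0 := by omega
    subst this; simp [solveWhileA]
  | succ fuel =>
    by_cases h1 : 0 < j <;> by_cases h2 : pvChar s j ≠ c <;>
      simp [solveWhileA, h1, h2, whileA_snd_zero]

theorem whileB_stop (s : List Char) (c : Char) (T : List Nat) (fuel j : Nat)
    (h : ¬(0 < j ∧ pvChar s j ≠ c)) : solveWhileB s c T fuel j = j := by
  cases fuel with
  | zero => rfl
  | succ fuel => simp [solveWhileB, h]

theorem whileB_spec (s : List Char) (i : Nat) (hi : i < s.length) (T : List Nat)
    (hT : ∀ k, k < i → T.getD k 0 = (k + 1) - minp s (k + 1)) :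
    ∀ fuel j, j ≤ fuel → j < i → Per (s.take i) (i - j) →
      (solveWhileB s (pvChar s i) T fuel j ≤ j ∧
       solveWhileB s (pvChar s i) T fuel j < i ∧
       Per (s.take i) (i - solveWhileB s (pvChar s i) T fuel j)) ∧
      (pvChar s (solveWhileB s (pvChar s i) T fuel j) ≠ pvChar s i →
        solveWhileB s (pvChar s i) T fuel j = 0) ∧
      (∀ b, solveWhileB s (pvChar s i) T fuel j < b → b ≤ j → Per (s.take i) (i - b) →
        pvChar s b ≠ pvChar s i) := by
  intro fuel
  induction fuel with
  | zero =>
    intro j hfj hji hper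
    have hj0 : j = 0 := by omega
    subst hj0
    rw [show solveWhileB s (pvChar s i) T 0 0 = 0 from rfl]
    exact ⟨⟨le_rfl, by omega, hper⟩, fun _ => rfl, fun b hb1 hb2 _ => absurd hb1 (by omega)⟩
  | succ fuel ih =>
    intro j hfj hji hper
    by_cases g : 0 < j ∧ pvChar s j ≠ pvChar s i
    · have hred : solveWhileB s (pvChar s i) T (fuel + 1) j =
          solveWhileB s (pvChar s i) T fuel (T.getD (j - 1) 0) := by
        simp [solveWhileB, g]
      have hTj : T.getD (j - 1) 0 = j - minp s j := by
        rw [hT (j - 1) (by omega)]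
        have : j - 1 + 1 = j := by omega
        rw [this]
      set j' := T.getD (j - 1) 0 with hj'def
      have hmpj1 : 1 ≤ minp s j := minp_pos s j
      have hmpjle : minp s j ≤ j := minp_le s j (by omega)
      have hj'lt : j' < j := by rw [hTj]; omega
      -- j' is a border of the prefix of length i
      have hperj' : Per (s.take i) (i - j') := by
        have hcomp : Per (s.take i) ((i - j) + minp s j) := by
          apply per_compose (s.take i) (i - j) (minp s j) hper _ (by
            rw [take_len s i (by omega)]; omega)
          have e1 : (s.take i).length - (i - j) = j := by
            rw [take_len s i (by omega)]; omega
          rw [e1, List.take_take, Nat.min_eq_left (by omega)]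
          exact minp_per s j
        have e : (i - j) + minp s j = i - j' := by rw [hTj]; omega
        rwa [e] at hcomp
      have hmain := ih j' (by omega) (by omega) hperj'
      rw [hred]
      refine ⟨⟨by omega, hmain.1.2.1, hmain.1.2.2⟩, hmain.2.1, ?_⟩
      intro b hb1 hb2 hbper
      by_cases hb3 : b ≤ j'
      · exact hmain.2.2 b hb1 hb3 hbper
      · by_cases hb4 : b = j
        · subst hb4; exact g.2
        · -- j' < b < j is impossible: b would be a border of the prefix of length j
          -- longer than its longest border j'
          exfalso
          have hblt : b < j := by omega
          have hres : Per ((s.take i).take ((s.take i).length - (i - j))) ((i - b) - (i - j)) := by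
            apply per_restrict (s.take i) (i - b) (i - j) hbper hper (by omega)
              (by rw [take_len s i (by omega)]; omega)
          have e1 : (s.take i).length - (i - j) = j := by
            rw [take_len s i (by omega)]; omega
          have e2 : (i - b) - (i - j) = j - b := by omega
          rw [e1, e2, List.take_take, Nat.min_eq_left (by omega)] at hres
          have := minp_min s j (j - b) (by omega) hres
          have : b ≤ j - minp s j := by omega
          rw [← hTj] at this
          omega
    · rw [whileB_stop s (pvChar s i) T (fuel + 1) j g]
      refine ⟨⟨le_rfl, hji, hper⟩, ?_, ?_⟩
      · intro hmis
        rcases Nat.eq_zero_or_pos j with h | h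
        · exact h
        · exact absurd ⟨h, hmis⟩ g
      · intro b hb1 hb2; omega


-- ======== one loop iteration matches the specification state ========

theorem hT_of_TS (s : List Char) (m : Nat) (hm : m ≤ s.length) :
    ∀ k, k < m → (TS s m).getD k 0 = (k + 1) - minp s (k + 1) := by
  intro k hk
  rw [TS_getD s m k (by omega), if_pos (by omega)]

theorem stepB_spec (s : List Char) (m : Nat) (h1 : 1 ≤ m) (hm : m < s.length) :
    solveStepB s (TS s m, m - minp s m) m =
      (TS s (m + 1), (m + 1) - minp s (m + 1)) := by
  have hq1 : 1 ≤ minp s m := minp_pos s m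
  have hqle : minp s m ≤ m := minp_le s m h1
  have hj0 : m - minp s m < m := by omega
  have hper0 : Per (s.take m) (m - (m - minp s m)) := by
    rw [show m - (m - minp s m) = minp s m from by omega]
    exact minp_per s m
  have W := whileB_spec s m hm (TS s m) (hT_of_TS s m (by omega))
    (m - minp s m) (m - minp s m) le_rfl hj0 hper0
  set r := solveWhileB s (pvChar s m) (TS s m) (m - minp s m) (m - minp s m) with hrdef
  simp only [solveStepB]
  by_cases hc : pvChar s r = pvChar s m
  · rw [if_pos hc]
    have hmp : minp s (m + 1) = m - r :=
      minp_succ_match s m r hm W.1.2.1 W.1.2.2 hc W.2.2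
    have hr1 : r + 1 = (m + 1) - minp s (m + 1) := by
      have := W.1.2.1; omega
    rw [hr1, TS_set s m hm]
  · rw [if_neg hc]
    have hr0 : r = 0 := W.2.1 hc
    have hmp : minp s (m + 1) = m + 1 := by
      apply minp_succ_nomatch s m hm
      · rw [← hr0]; exact hc
      · intro b hb1 hb2 hbper
        exact W.2.2 b (by omega) hb2 hbper
    have hr0' : solveWhileB s (pvChar s m) (TS s m) (m - minp s m) (m - minp s m) = 0 := hr0
    rw [hr0', hmp, ← TS_nomatch s m hm hmp]
    simp

theorem stepA_spec (s : List Char) (m : Nat) (h1 : 1 ≤ m) (hm : m < s.length) :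
    solveStepA s (TS s m, m - minp s m,
        (if 2 * minp s m ≤ m then minp s m else 0), resSpec s m) m =
      (TS s (m + 1), (m + 1) - minp s (m + 1),
        (if 2 * minp s (m + 1) ≤ m + 1 then minp s (m + 1) else 0), resSpec s (m + 1)) := by
  have hq1 : 1 ≤ minp s m := minp_pos s m
  have hqle : minp s m ≤ m := minp_le s m h1
  have hj0 : m - minp s m < m := by omega
  have hper0 : Per (s.take m) (m - (m - minp s m)) := by
    rw [show m - (m - minp s m) = minp s m from by omega]
    exact minp_per s m
  have W := whileB_spec s m hm (TS s m) (hT_of_TS s m (by omega))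
    (m - minp s m) (m - minp s m) le_rfl hj0 hper0
  simp only [solveStepA, whileA_fst,
    whileA_snd s (pvChar s m) (TS s m) (m - minp s m) (m - minp s m) _ le_rfl]
  set r := solveWhileB s (pvChar s m) (TS s m) (m - minp s m) (m - minp s m) with hrdef
  set baseW := if 0 < m - minp s m ∧ pvChar s (m - minp s m) ≠ pvChar s m then 0
    else (if 2 * minp s m ≤ m then minp s m else 0) with hbWdef
  have hp'1 : 1 ≤ minp s (m + 1) := minp_pos s (m + 1)
  by_cases hc : pvChar s r = pvChar s m
  · rw [if_pos hc]
    have hmp : minp s (m + 1) = m - r :=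
      minp_succ_match s m r hm W.1.2.1 W.1.2.2 hc W.2.2
    have hrm : r < m := W.1.2.1
    have hr1 : r + 1 = (m + 1) - minp s (m + 1) := by omega
    -- the base variable after this iteration
    have hbase : (if m + 1 = (r + 1) * 2 then r + 1 else baseW) =
        (if 2 * minp s (m + 1) ≤ m + 1 then minp s (m + 1) else 0) := by
      by_cases hif : m + 1 = (r + 1) * 2
      · rw [if_pos hif, if_pos (by omega), hmp]; omega
      · rw [if_neg hif]
        by_cases g0 : 0 < m - minp s m ∧ pvChar s (m - minp s m) ≠ pvChar s m
        · rw [hbWdef, if_pos g0]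
          have hfb := fallback_ge s m hm h1 g0.2
          rw [if_neg (by omega)]
        · have hrj : r = m - minp s m := by
            rw [hrdef]; exact whileB_stop s (pvChar s m) (TS s m) _ _ g0
          have hpq : minp s (m + 1) = minp s m := by omega
          rw [hbWdef, if_neg g0, hpq]
          have hne : ¬(2 * minp s m = m + 1) := by omega
          split_ifs <;> omega
    rw [hbase]
    -- the result list after this iteration
    have hres : (if 0 < (if 2 * minp s (m + 1) ≤ m + 1 then minp s (m + 1) else 0) ∧
          (m + 1) % (if 2 * minp s (m + 1) ≤ m + 1 then minp s (m + 1) else 0) = 0 then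
          resSpec s m ++ [(((m + 1 : Nat) : Int),
            (((m + 1) / (if 2 * minp s (m + 1) ≤ m + 1 then minp s (m + 1) else 0) : Nat) : Int))]
        else resSpec s m) = resSpec s (m + 1) := by
      rw [resSpec_succ]
      by_cases hcnd : minp s (m + 1) < m + 1 ∧ (m + 1) % minp s (m + 1) = 0
      · have hdvd : minp s (m + 1) ∣ (m + 1) := Nat.dvd_of_mod_eq_zero hcnd.2
        obtain ⟨k, hk⟩ := hdvd
        have hk2 : 2 ≤ k := by
          by_contra hk1
          interval_cases k <;> omega
        have h2p : 2 * minp s (m + 1) ≤ m + 1 := by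
          calc 2 * minp s (m + 1) = minp s (m + 1) * 2 := by ring
          _ ≤ minp s (m + 1) * k := Nat.mul_le_mul_left _ hk2
          _ = m + 1 := hk.symm
        rw [if_pos h2p, if_pos (by constructor <;> omega)]
        rw [emitF, if_pos hcnd]
        simp
      · rw [emitF, if_neg hcnd]
        have : ¬(0 < (if 2 * minp s (m + 1) ≤ m + 1 then minp s (m + 1) else 0) ∧
            (m + 1) % (if 2 * minp s (m + 1) ≤ m + 1 then minp s (m + 1) else 0) = 0) := by
          by_cases h2p : 2 * minp s (m + 1) ≤ m + 1
          · rw [if_pos h2p]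
            intro ⟨ha, hb⟩
            exact hcnd ⟨by omega, hb⟩
          · rw [if_neg h2p]
            intro ⟨ha, _⟩
            omega
        rw [if_neg this]
        simp
    rw [hres, hr1, TS_set s m hm]
  · rw [if_neg hc]
    have hr0 : r = 0 := W.2.1 hc
    have hmp : minp s (m + 1) = m + 1 := by
      apply minp_succ_nomatch s m hm
      · rw [← hr0]; exact hc
      · intro b hb1 hb2 hbper
        exact W.2.2 b (by omega) hb2 hbper
    have hbase : baseW = 0 := by
      by_cases g0 : 0 < m - minp s m ∧ pvChar s (m - minp s m) ≠ pvChar s m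
      · rw [hbWdef, if_pos g0]
      · have hrj : r = m - minp s m := by
          rw [hrdef]; exact whileB_stop s (pvChar s m) (TS s m) _ _ g0
        have : minp s m = m := by omega
        rw [hbWdef, if_neg g0, this, if_neg (by omega)]
    have hres : resSpec s m = resSpec s (m + 1) := by
      rw [resSpec_succ, emitF, if_neg (by rw [hmp]; omega)]
      simp
    rw [hr0, hbase, ← hres, hmp, ← TS_nomatch s m hm hmp,
      if_neg (by omega : ¬(2 * (m + 1) ≤ m + 1))]
    simp

-- ======== the full loops ========

theorem foldA (s : List Char) : ∀ t, t ≤ s.length - 1 →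
    (List.range' 1 t).foldl (solveStepA s)
        (List.replicate s.length 0, 0, 0, ([] : List (Int × Int))) =
      (TS s (t + 1), (t + 1) - minp s (t + 1),
        (if 2 * minp s (t + 1) ≤ t + 1 then minp s (t + 1) else 0), resSpec s (t + 1)) := by
  intro t
  induction t with
  | zero =>
    intro _
    simp [TS_one, minp_one, resSpec_one]
  | succ t ih =>
    intro ht
    rw [List.range'_concat, List.foldl_append, ih (by omega)]
    simp only [List.foldl_cons, List.foldl_nil]
    rw [show 1 + 1 * t = t + 1 from by omega]
    exact stepA_spec s (t + 1) (by omega) (by omega)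

theorem foldB (s : List Char) : ∀ t, t ≤ s.length - 1 →
    (List.range' 1 t).foldl (solveStepB s) (List.replicate s.length 0, 0) =
      (TS s (t + 1), (t + 1) - minp s (t + 1)) := by
  intro t
  induction t with
  | zero =>
    intro _
    simp [TS_one, minp_one]
  | succ t ih =>
    intro ht
    rw [List.range'_concat, List.foldl_append, ih (by omega)]
    simp only [List.foldl_cons, List.foldl_nil]
    rw [show 1 + 1 * t = t + 1 from by omega]
    exact stepB_spec s (t + 1) (by omega) (by omega)

theorem scanB (s : List Char) (T : List Nat)
    (hT : ∀ k, k < s.length → T.getD k 0 = (k + 1) - minp s (k + 1)) :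
    ∀ t, t ≤ s.length →
      (List.range' 1 t).foldl (fun res L =>
          let p := L - T.getD (L - 1) 0
          if p < L ∧ L % p = 0 then
            res ++ [(((L : Nat) : Int), (((L / p : Nat)) : Int))] else res) [] =
        resSpec s t := by
  intro t
  induction t with
  | zero => intro _; simp [resSpec]
  | succ t ih =>
    intro ht
    rw [List.range'_concat, List.foldl_append, ih (by omega)]
    simp only [List.foldl_cons, List.foldl_nil]
    rw [show 1 + 1 * t = t + 1 from by omega]
    have hTt : T.getD (t + 1 - 1) 0 = (t + 1) - minp s (t + 1) := by
      rw [show t + 1 - 1 = t from rfl]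
      exact hT t (by omega)
    rw [resSpec_succ]
    simp only [hTt]
    have hple : minp s (t + 1) ≤ t + 1 := minp_le s (t + 1) (by omega)
    rw [show (t + 1) - ((t + 1) - minp s (t + 1)) = minp s (t + 1) from by omega]
    rw [emitF]
    by_cases hcnd : minp s (t + 1) < t + 1 ∧ (t + 1) % minp s (t + 1) = 0
    · rw [if_pos hcnd, if_pos hcnd]; simp
    · rw [if_neg hcnd, if_neg hcnd]; simp

-- ===== VERDICT (by name: the statement is the Claim_ definition above) =====
theorem solve_spec : Claim_equal_solve := by
  unfold Claim_equal_solve Spec_solve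
  intro ptn _
  simp only [solve, solve_alt]
  by_cases hn : ptn.toList.length = 0
  · rw [hn]
    rfl
  · rw [foldA ptn.toList (ptn.toList.length - 1) le_rfl,
        foldB ptn.toList (ptn.toList.length - 1) le_rfl,
        show ptn.toList.length - 1 + 1 = ptn.toList.length from by omega]
    rw [scanB ptn.toList (TS ptn.toList ptn.toList.length)
      (hT_of_TS ptn.toList ptn.toList.length le_rfl) ptn.toList.length le_rfl]
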